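-- pv_equiv track=rewrite | github.com/copelandsoftware/api-gateway-ansible | library/apigw_resource.py | _build_create_resources_list
-- ===== SOURCE A (Python) =====
-- def _build_create_resources_list(path_map, resource):
--   """
--   Splits resource and builds a list of create operations
--   :param path_map: A map containing path parts
--   :param resource: The url to create
--   :return: Ordered list of resources to create
--   """
--   operations = []
--   last_part = ''
--   parts = resource.split('/')[1:]
--   for part in parts:
--     new_part = "{0}/{1}".format(last_part, part)
--     if new_part not in path_map['paths']:
--       operations.append({'part': part, 'path': new_part, 'parent': '/' if last_part == '' else last_part})
--     last_part = new_part
--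
--   return operations
-- ===== SOURCE B (Python) =====
-- def _build_create_resources_list(path_map, resource):
--   """Top-down recursion on the full path string: compute the operations for the
--   parent path (found with rpartition) recursively, then append this path's
--   operation if it is not yet known.  No split-into-parts, no running prefix."""
--   head, sep, tail = resource.partition('/')
--   if not sep:
--     return []
--   known = path_map['paths']
--
--   def rec(path):
--     if not path:
--       return []
--     parent, _, part = path.rpartition('/')
--     ops = rec(parent)
--     if path not in known:
--       ops.append({'part': part, 'path': path,
--                   'parent': parent if parent else '/'})
--     return ops
--
--   return rec(sep + tail)
-- ===== Notes on version B (the rewrite author's own statement) =====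
-- stated objective: alternative
-- what changed: A loops left-to-right over resource.split('/')[1:] with a running prefix accumulator, emitting ops as it goes; B never splits into parts: it recurses top-down on the full path string, using rpartition to step from a path to its parent, computes the parent's operations recursively and then appends this path's op if unknown.
import Mathlib
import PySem

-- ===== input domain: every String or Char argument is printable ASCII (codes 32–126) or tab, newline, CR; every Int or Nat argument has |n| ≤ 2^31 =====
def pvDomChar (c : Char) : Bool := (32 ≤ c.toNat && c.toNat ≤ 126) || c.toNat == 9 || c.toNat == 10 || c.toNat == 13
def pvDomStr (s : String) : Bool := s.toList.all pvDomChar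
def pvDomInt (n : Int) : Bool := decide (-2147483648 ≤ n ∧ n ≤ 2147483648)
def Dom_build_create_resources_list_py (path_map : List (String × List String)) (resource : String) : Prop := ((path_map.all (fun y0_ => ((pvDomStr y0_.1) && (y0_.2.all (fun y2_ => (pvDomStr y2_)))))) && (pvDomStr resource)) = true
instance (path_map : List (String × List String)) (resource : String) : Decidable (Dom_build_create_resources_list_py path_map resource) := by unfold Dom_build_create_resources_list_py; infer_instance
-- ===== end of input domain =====

-- B recurses top-down on the full path string via rpartition (parent first, then this
-- path's op) instead of A's left-to-right loop over split parts; objective: alternative.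

-- ===== PORT A =====
def build_create_resources_list_py (path_map : List (String × List String)) (resource : String) : List (List (String × String)) :=
  let paths := (List.lookup "paths" path_map).getD []
  let parts := ((PySem.Str.split? resource "/").getD []).drop 1
  (parts.foldl
    (fun (st : List (List (String × String)) × String) part =>
      let new_part := st.2 ++ "/" ++ part
      ( if paths.contains new_part then st.1
        else st.1 ++ [[("part", part), ("path", new_part),
                       ("parent", if st.2 = "" then "/" else st.2)]],
        new_part))
    ([], "")).1

-- ===== PORT B =====
-- path.rpartition('/') with the separator dropped: (text before the last '/', text after
-- it); if there is no '/', Python returns ('', '', path), i.e. here ([], cs).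
-- Ported by hand (no PySem primitive); exact on all inputs.
def rpartSlash : List Char → List Char × List Char
  | [] => ([], [])
  | c :: rest =>
    if rest.contains '/' then
      let pr := rpartSlash rest
      (c :: pr.1, pr.2)
    else if c = '/' then ([], rest)
    else ([], c :: rest)

-- termination measure for bRec: the parent path is strictly shorter
theorem rpartSlash_fst_length_lt : ∀ (cs : List Char), cs ≠ [] → (rpartSlash cs).1.length < cs.length := by
  intro cs
  induction cs with
  | nil => intro h; exact absurd rfl h
  | cons c rest ih =>
    intro _
    by_cases hr : rest.contains '/'
    · have hrest : rest ≠ [] := by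
        intro h; subst h; simp at hr
      simp only [rpartSlash, hr, if_pos, List.length_cons]
      exact Nat.succ_lt_succ (ih hrest)
    · have hr' : '/' ∉ rest := by simpa using hr
      by_cases hc : c = '/'
      · simp [rpartSlash, hr', hc]
      · simp [rpartSlash, hr', hc]

-- B's inner rec(path): operations for the parent path first, then this path's op
def bRec (known : List String) : List Char → List (List (String × String))
  | [] => []
  | c :: rest =>
    let pr := rpartSlash (c :: rest)
    let ops := bRec known pr.1
    if known.contains (String.ofList (c :: rest)) then ops
    else ops ++ [[("part", String.ofList pr.2),
                  ("path", String.ofList (c :: rest)),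
                  ("parent", if pr.1 = [] then "/" else String.ofList pr.1)]]
  termination_by cs => cs.length
  decreasing_by exact rpartSlash_fst_length_lt (c :: rest) (List.cons_ne_nil _ _)

-- entry: head, sep, tail = resource.partition('/'); if not sep: return [];
-- sep+tail are exactly the chars of resource from the first '/' on (ported by hand, exact)
def build_create_resources_list_py_alt (path_map : List (String × List String)) (resource : String) : List (List (String × String)) :=
  let cs := resource.toList
  if cs.contains '/' then
    let known := (List.lookup "paths" path_map).getD []
    bRec known (cs.dropWhile (fun c => c ≠ '/'))
  else []

-- ===== PRECONDITION & SPEC =====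
-- Pre_ excludes exactly the inputs where Python A raises KeyError: resource contains '/'
-- (so the loop body runs) while path_map has no 'paths' key.  (Python B raises there too.)
def Pre_build_create_resources_list_py (path_map : List (String × List String)) (resource : String) : Prop :=
  ("paths" ∈ path_map.map Prod.fst) ∨ ('/' ∉ resource.toList)
instance (path_map : List (String × List String)) (resource : String) : Decidable (Pre_build_create_resources_list_py path_map resource) := by unfold Pre_build_create_resources_list_py; infer_instance

def pvWitness_build_create_resources_list_py : (List (String × List String)) × String :=
  ([("paths", ["/a"])], "/a/b")

def Spec_build_create_resources_list_py (path_map : List (String × List String)) (resource : String) (out : List (List (String × String))) : Prop := out = build_create_resources_list_py_alt path_map resource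
instance (path_map : List (String × List String)) (resource : String) (out : List (List (String × String))) : Decidable (Spec_build_create_resources_list_py path_map resource out) := by unfold Spec_build_create_resources_list_py; infer_instance

-- ===== CLAIM (what is proved, stated in full; the proofs are below) =====
def Claim_equal_build_create_resources_list_py : Prop := ∀ (path_map : List (String × List String)) (resource : String), Dom_build_create_resources_list_py path_map resource → Pre_build_create_resources_list_py path_map resource → Spec_build_create_resources_list_py path_map resource (build_create_resources_list_py path_map resource)

-- ===== LEMMAS AND PROOFS =====

/-- The sequence of operations A's loop appends, as a structural recursion. -/
def aGo (paths : List String) (last : String) : List String → List (List (String × String))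
  | [] => []
  | p :: ps =>
    (if paths.contains (last ++ "/" ++ p) then []
     else [[("part", p), ("path", last ++ "/" ++ p),
            ("parent", if last = "" then "/" else last)]])
    ++ aGo paths (last ++ "/" ++ p) ps

/-- The cumulative path built after consuming a list of parts. -/
def accPath (last : String) : List String → String
  | [] => last
  | p :: ps => accPath (last ++ "/" ++ p) ps

/-- Structural model of PySem.Chars.splitOn cs ['/']. -/
def sp : List Char → List (List Char)
  | [] => [[]]
  | c :: rest =>
    if c = '/' then [] :: sp rest
    else match sp rest with
         | [] => [[c]]          -- unreachable (sp is never [])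
         | h :: t => (c :: h) :: t

theorem sp_ne_nil (cs : List Char) : sp cs ≠ [] := by
  cases cs with
  | nil => simp [sp]
  | cons c rest =>
    by_cases hc : c = '/'
    · simp [sp, hc]
    · simp only [sp, hc, ne_eq]
      cases sp rest <;> simp

theorem foldlA (paths : List String) :
    ∀ (parts : List String) (ops : List (List (String × String))) (last : String),
    (parts.foldl
      (fun (st : List (List (String × String)) × String) part =>
        let new_part := st.2 ++ "/" ++ part
        ( if paths.contains new_part then st.1
          else st.1 ++ [[("part", part), ("path", new_part),
                         ("parent", if st.2 = "" then "/" else st.2)]],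
          new_part))
      (ops, last)).1 = ops ++ aGo paths last parts := by
  intro parts
  induction parts with
  | nil => intro ops last; simp [aGo]
  | cons p ps ih =>
    intro ops last
    simp only [List.foldl_cons, aGo]
    by_cases hc : paths.contains (last ++ "/" ++ p)
    · simp only [hc, if_pos, ih]
      simp
    · simp only [hc, ih]
      simp

theorem accPath_append (qs : List String) : ∀ (ps : List String) (last : String),
    accPath last (ps ++ qs) = accPath (accPath last ps) qs := by
  intro ps
  induction ps with
  | nil => intro last; simp [accPath]
  | cons p ps ih => intro last; simp [accPath, ih]

theorem aGo_append (paths qs : List String) : ∀ (ps : List String) (last : String),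
    aGo paths last (ps ++ qs) = aGo paths last ps ++ aGo paths (accPath last ps) qs := by
  intro ps
  induction ps with
  | nil => intro last; simp [aGo, accPath]
  | cons p ps ih => intro last; simp [aGo, accPath, ih]

theorem rpartSlash_spec (ys : List Char) (h : '/' ∉ ys) :
    ∀ (xs : List Char), rpartSlash (xs ++ '/' :: ys) = (xs, ys) := by
  intro xs
  induction xs with
  | nil =>
    simp [rpartSlash, h]
  | cons x xs ih =>
    have hc : (xs ++ '/' :: ys).contains '/' = true := by simp
    simp [rpartSlash, ih]

theorem bRec_append_slash (known : List String) (xs ys : List Char) (h : '/' ∉ ys) :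
    bRec known (xs ++ '/' :: ys) =
      bRec known xs ++
      (if known.contains (String.ofList (xs ++ '/' :: ys)) then []
       else [[("part", String.ofList ys),
              ("path", String.ofList (xs ++ '/' :: ys)),
              ("parent", if xs = [] then "/" else String.ofList xs)]]) := by
  have hspec := rpartSlash_spec ys h
  cases xs with
  | nil =>
    rw [List.nil_append]
    have h0 : rpartSlash ('/' :: ys) = ([], ys) := by
      have := hspec []; simpa using this
    conv_lhs => rw [bRec]
    rw [h0]
    simp only [bRec]
    split <;> simp
  | cons x xs' =>
    conv_lhs => rw [List.cons_append, bRec]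
    rw [← List.cons_append, hspec (x :: xs')]
    split <;> simp

theorem toList_accPath_append (last p : String) (ps : List String) :
    (accPath last (ps ++ [p])).toList = (accPath last ps).toList ++ '/' :: p.toList := by
  rw [accPath_append]
  simp [accPath, String.toList_append]

/-- Main bridge: B's top-down recursion on the full path equals A's loop over the parts. -/
theorem mainL (known : List String) :
    ∀ (ps : List String), (∀ p ∈ ps, '/' ∉ p.toList) →
    bRec known (accPath "" ps).toList = aGo known "" ps := by
  intro ps
  induction ps using List.reverseRecOn with
  | nil =>
    intro _
    have : ("" : String).toList = [] := by decide
    simp [accPath, aGo, this, bRec]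
  | append_singleton ps p ih =>
    intro hps
    have hp : '/' ∉ p.toList := hps p (by simp)
    have hrest : ∀ q ∈ ps, '/' ∉ q.toList := fun q hq => hps q (by simp [hq])
    rw [toList_accPath_append, bRec_append_slash known _ _ hp, ih hrest,
        aGo_append]
    have hlist : (accPath "" ps).toList ++ '/' :: p.toList
        = (accPath "" ps ++ "/" ++ p).toList := by
      simp [String.toList_append]
    have hstr : String.ofList ((accPath "" ps).toList ++ '/' :: p.toList)
        = accPath "" ps ++ "/" ++ p := by
      rw [hlist, String.ofList_toList]
    have hemp : ((accPath "" ps).toList = []) = (accPath "" ps = "") := by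
      simp [String.toList_eq_nil_iff]
    simp only [aGo, hstr, hemp, String.ofList_toList, List.append_nil]

-- ===== facts about sp =====

theorem splitOn_go_eq (fuel : Nat) : ∀ (l cur : List Char) (acc : List (List Char)),
    l.length ≤ fuel →
    PySem.Chars.splitOn.go ['/'] fuel l cur acc =
      acc.reverse ++ (match sp l with
                      | [] => [cur.reverse]
                      | h :: t => (cur.reverse ++ h) :: t) := by
  induction fuel with
  | zero =>
    intro l cur acc hl
    have : l = [] := List.length_eq_zero_iff.mp (Nat.le_zero.mp hl)
    subst this
    simp [PySem.Chars.splitOn.go, sp]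
  | succ fuel ih =>
    intro l cur acc hl
    cases l with
    | nil => simp [PySem.Chars.splitOn.go, sp]
    | cons c rest =>
      have hrest : rest.length ≤ fuel := by simpa using hl
      by_cases hc : c = '/'
      · subst hc
        have hpre : (['/'] : List Char).isPrefixOf ('/' :: rest) = true := by
          simp [List.isPrefixOf]
        rw [PySem.Chars.splitOn.go]
        have hd : List.drop (['/'] : List Char).length ('/' :: rest) = rest := by simp
        rw [if_pos hpre, hd, ih rest [] _ hrest]
        have hsp := sp_ne_nil rest
        cases hh : sp rest with
        | nil => exact absurd hh hsp
        | cons h t => simp [sp, hh]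
      · have hpre : (['/'] : List Char).isPrefixOf (c :: rest) = false := by
          have hc' : ¬ ('/' = c) := fun e => hc e.symm
          simp [List.isPrefixOf, hc']
        rw [PySem.Chars.splitOn.go]
        simp only [hpre, Bool.false_eq_true, if_false]
        rw [ih rest (c :: cur) acc hrest]
        have hsp := sp_ne_nil rest
        have hc' : ¬ ('/' = c) := fun e => hc e.symm
        cases hh : sp rest with
        | nil => exact absurd hh hsp
        | cons h t => simp [sp, hc, hc', hh]

theorem splitOn_eq_sp (cs : List Char) : PySem.Chars.splitOn cs ['/'] = sp cs := by
  unfold PySem.Chars.splitOn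
  rw [splitOn_go_eq (cs.length + 1) cs [] [] (Nat.le_succ _)]
  have hsp := sp_ne_nil cs
  cases hh : sp cs with
  | nil => exact absurd hh hsp
  | cons h t => simp

/-- No element of sp cs contains '/'. -/
theorem sp_no_slash (cs : List Char) : ∀ e ∈ sp cs, '/' ∉ e := by
  induction cs with
  | nil => simp [sp]
  | cons c rest ih =>
    by_cases hc : c = '/'
    · simp only [sp, hc, if_pos]
      intro e he
      rcases List.mem_cons.mp he with h | h
      · subst h; simp
      · exact ih e h
    · simp only [sp, hc]
      cases hh : sp rest with
      | nil => exact absurd hh (sp_ne_nil rest)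
      | cons h t =>
        intro e he
        rcases List.mem_cons.mp he with h1 | h1
        · subst h1
          intro hm
          rcases List.mem_cons.mp hm with h2 | h2
          · exact hc h2.symm
          · exact ih h (by rw [hh]; simp) h2
        · intro hm
          exact ih e (by rw [hh]; exact List.mem_cons_of_mem _ h1) hm

/-- '/' ∉ cs → sp cs = [cs]. -/
theorem sp_of_no_slash (cs : List Char) (h : '/' ∉ cs) : sp cs = [cs] := by
  induction cs with
  | nil => simp [sp]
  | cons c rest ih =>
    have hc : c ≠ '/' := fun hh => h (by simp [hh])
    have hrest : '/' ∉ rest := fun hh => h (by simp [hh])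
    have hne : ¬ (c = '/') := fun hh => hc hh
    simp [sp, hne, ih hrest]

/-- cs is its first segment followed by '/'-prefixed remaining segments. -/
theorem sp_join : ∀ (cs h : List Char) (t : List (List Char)),
    sp cs = h :: t → cs = h ++ t.flatMap (fun g => '/' :: g) := by
  intro cs
  induction cs with
  | nil =>
    intro h t hh
    simp only [sp] at hh
    rw [List.cons_eq_cons] at hh
    obtain ⟨h1, h2⟩ := hh
    subst h1; subst h2
    simp
  | cons c rest ih =>
    intro h t hh
    by_cases hc : c = '/'
    · subst hc
      simp only [sp, if_pos] at hh
      rw [List.cons_eq_cons] at hh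
      obtain ⟨h1, h2⟩ := hh
      subst h1; subst h2
      cases hh' : sp rest with
      | nil => exact absurd hh' (sp_ne_nil rest)
      | cons h' t' =>
        have hr := ih h' t' hh'
        conv_lhs => rw [hr]
        simp
    · simp only [sp, hc, if_false] at hh
      cases hh' : sp rest with
      | nil => exact absurd hh' (sp_ne_nil rest)
      | cons h' t' =>
        rw [hh'] at hh
        rw [List.cons_eq_cons] at hh
        obtain ⟨h1, h2⟩ := hh
        subst h2
        have := ih h' t' hh'
        simp [← h1, this]

theorem dropWhile_no_slash (x : List Char) : ∀ (h : List Char), (∀ c ∈ h, c ≠ '/') →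
    List.dropWhile (fun c => c ≠ '/') (h ++ x) = List.dropWhile (fun c => c ≠ '/') x := by
  intro h
  induction h with
  | nil => intro _; simp
  | cons c cs ih =>
    intro hall
    have hc : c ≠ '/' := hall c (by simp)
    simp only [List.cons_append, List.dropWhile_cons]
    simp only [hc, ne_eq, not_false_eq_true, decide_true, if_true]
    exact ih (fun d hd => hall d (by simp [hd]))

theorem accPath_toList : ∀ (t : List (List Char)) (last : String),
    (accPath last (t.map String.ofList)).toList
      = last.toList ++ t.flatMap (fun g => '/' :: g) := by
  intro t
  induction t with
  | nil => intro last; simp [accPath]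
  | cons g t ih =>
    intro last
    simp only [List.map_cons, accPath, ih, List.flatMap_cons]
    simp [String.toList_append]

-- ===== VERDICT (by name: the statement is the Claim_ definition above) =====
theorem build_create_resources_list_py_spec : Claim_equal_build_create_resources_list_py := by
  intro path_map resource _ _
  unfold Spec_build_create_resources_list_py
  unfold build_create_resources_list_py build_create_resources_list_py_alt
  simp only []
  set paths := (List.lookup "paths" path_map).getD [] with hpaths
  set cs := resource.toList with hcs
  have hsplit : PySem.Str.split? resource "/" = some ((sp cs).map String.ofList) := by
    unfold PySem.Str.split?
    have hsep : ("/" : String).toList = ['/'] := by decide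
    rw [hsep]
    unfold PySem.Chars.split?
    simp only [List.isEmpty_cons, Bool.false_eq_true, if_false, splitOn_eq_sp]
    simp [hcs]
  by_cases hc : cs.contains '/'
  · -- resource has a '/'
    cases hh : sp cs with
    | nil => exact absurd hh (sp_ne_nil cs)
    | cons h t =>
      have hjoin := sp_join cs h t hh
      have hhead : ∀ c ∈ h, c ≠ '/' := by
        intro c hcm hceq
        exact sp_no_slash cs h (by rw [hh]; simp) (hceq ▸ hcm)
      have ht : t ≠ [] := by
        intro h0
        subst h0
        simp only [List.flatMap_nil, List.append_nil] at hjoin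
        rw [hjoin] at hc
        rcases List.mem_of_elem_eq_true hc with hcm
        exact hhead '/' hcm rfl
      have hdrop : cs.dropWhile (fun c => c ≠ '/') = t.flatMap (fun g => '/' :: g) := by
        conv_lhs => rw [hjoin]
        rw [dropWhile_no_slash _ h hhead]
        cases t with
        | nil => simp
        | cons g t' => simp
      have hparts : ((PySem.Str.split? resource "/").getD []).drop 1 = t.map String.ofList := by
        rw [hsplit]
        simp [hh]
      rw [hparts, foldlA paths (t.map String.ofList) [] ""]
      simp only [List.nil_append, hc, if_pos]
      rw [hdrop]
      have hacc : (accPath "" (t.map String.ofList)).toList = t.flatMap (fun g => '/' :: g) := by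
        rw [accPath_toList]
        have : ("" : String).toList = [] := by decide
        simp [this]
      rw [← hacc]
      rw [mainL paths (t.map String.ofList)]
      intro p hp
      rcases List.mem_map.mp hp with ⟨g, hg, hgp⟩
      subst hgp
      rw [String.toList_ofList]
      exact sp_no_slash cs g (by rw [hh]; exact List.mem_cons_of_mem _ hg)
  · -- no '/': both sides are []
    have hno : '/' ∉ cs := by
      intro hm
      exact hc (List.elem_eq_true_of_mem hm)
    have hparts : ((PySem.Str.split? resource "/").getD []).drop 1 = [] := by
      rw [hsplit, sp_of_no_slash cs hno]
      simp
    rw [hparts]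
    simp only [List.foldl_nil, hc, Bool.false_eq_true, if_false]
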